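-- pv_equiv track=rewrite | github.com/NGEN-Room/heroes-mvp | backend/engine/status.py | has_status_rule
-- ===== SOURCE A (Python) =====
-- def _normalized(value):
--     return str(value or "").strip().lower()
--
-- def has_status_rule(character, effect_types=None, names=None):
--     effect_types = {_normalized(effect_type) for effect_type in effect_types or []}
--     names = {_normalized(name) for name in names or []}
--
--     for status in character.get("status", []):
--         effect_type = _normalized(status.get("effectType"))
--         name = _normalized(status.get("name"))
--
--         if effect_type and effect_type in effect_types:
--             return True
--         if name and name in names:
--             return True
--
--     return False
-- ===== SOURCE B (Python) =====
-- def _normalized(value):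
--     return str(value or "").strip().lower()
--
-- def has_status_rule(character, effect_types=None, names=None):
--     statuses = character.get("status", [])
--     present_effects = {_normalized(s.get("effectType")) for s in statuses}
--     present_names = {_normalized(s.get("name")) for s in statuses}
--     query_effects = {_normalized(e) for e in effect_types or []}
--     query_names = {_normalized(n) for n in names or []}
--     return bool(((present_effects & query_effects) - {""})
--                 or ((present_names & query_names) - {""}))
-- ===== Notes on version B (the rewrite author's own statement) =====
-- stated objective: idiomatic
-- what changed: Replaces the per-status early-return loop with building the sets of normalized effectTypes and names present on the character and testing whether either set-intersection with the query sets, minus the empty string, is non-empty.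
import Mathlib
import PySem

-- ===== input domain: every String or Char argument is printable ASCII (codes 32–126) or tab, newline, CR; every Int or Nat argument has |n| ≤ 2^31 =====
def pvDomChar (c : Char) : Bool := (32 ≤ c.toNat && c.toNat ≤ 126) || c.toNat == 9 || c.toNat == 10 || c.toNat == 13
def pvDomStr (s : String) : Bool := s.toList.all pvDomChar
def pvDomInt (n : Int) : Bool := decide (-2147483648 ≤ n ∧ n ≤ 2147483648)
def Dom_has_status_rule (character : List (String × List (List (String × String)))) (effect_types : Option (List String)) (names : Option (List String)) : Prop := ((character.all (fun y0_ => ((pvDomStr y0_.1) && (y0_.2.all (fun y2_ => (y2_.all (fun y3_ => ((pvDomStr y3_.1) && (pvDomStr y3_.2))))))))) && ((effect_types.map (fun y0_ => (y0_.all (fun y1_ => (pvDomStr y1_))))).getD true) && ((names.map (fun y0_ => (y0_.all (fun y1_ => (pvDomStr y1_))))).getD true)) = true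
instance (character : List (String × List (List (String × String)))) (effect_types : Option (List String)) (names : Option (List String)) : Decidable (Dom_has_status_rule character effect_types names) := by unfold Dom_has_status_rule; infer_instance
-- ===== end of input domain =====

-- B builds the sets of normalized effectTypes/names present on the character and tests set intersections (minus "") for non-emptiness, instead of A's per-status early-return loop; return value only, no mutation.
-- ===== PORT A =====
def pvNorm (s : String) : String := PySem.Str.lower (PySem.Str.strip s)

-- _normalized(value) for value : Option String: str(value or "") = value.getD "" (exact: '' or None both give "")
def pvNormOpt (v : Option String) : String := pvNorm (v.getD "")

-- the for-loop with its two early returns, as structural recursion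
def pvLoopA (ets nms : PySem.Set String) : List (List (String × String)) → Bool
  | [] => false
  | st :: rest =>
    let effect_type := pvNormOpt ((PySem.Dict.mk st).get? "effectType")
    let name := pvNormOpt ((PySem.Dict.mk st).get? "name")
    if effect_type ≠ "" && PySem.Set.contains ets effect_type then true
    else if name ≠ "" && PySem.Set.contains nms name then true
    else pvLoopA ets nms rest

def has_status_rule (character : List (String × List (List (String × String)))) (effect_types : Option (List String)) (names : Option (List String)) : Bool :=
  let ets := PySem.Set.ofList ((effect_types.getD []).map pvNorm)
  let nms := PySem.Set.ofList ((names.getD []).map pvNorm)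
  pvLoopA ets nms ((PySem.Dict.mk character).getD "status" [])


-- ===== PORT B =====
def has_status_rule_alt (character : List (String × List (List (String × String)))) (effect_types : Option (List String)) (names : Option (List String)) : Bool :=
  let statuses := (PySem.Dict.mk character).getD "status" []
  let present_effects := PySem.Set.ofList (statuses.map (fun s => pvNormOpt ((PySem.Dict.mk s).get? "effectType")))
  let present_names := PySem.Set.ofList (statuses.map (fun s => pvNormOpt ((PySem.Dict.mk s).get? "name")))
  let query_effects := PySem.Set.ofList ((effect_types.getD []).map pvNorm)
  let query_names := PySem.Set.ofList ((names.getD []).map pvNorm)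
  !(PySem.Set.diff (PySem.Set.inter present_effects query_effects) [""]).isEmpty ||
  !(PySem.Set.diff (PySem.Set.inter present_names query_names) [""]).isEmpty


-- ===== PRECONDITION & SPEC =====
def Spec_has_status_rule (character : List (String × List (List (String × String)))) (effect_types : Option (List String)) (names : Option (List String)) (out : Bool) : Prop := out = has_status_rule_alt character effect_types names
instance (character : List (String × List (List (String × String)))) (effect_types : Option (List String)) (names : Option (List String)) (out : Bool) : Decidable (Spec_has_status_rule character effect_types names out) := by unfold Spec_has_status_rule; infer_instance

-- ===== CLAIM (what is proved, stated in full; the proofs are below) =====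
def Claim_equal_has_status_rule : Prop := ∀ (character : List (String × List (List (String × String)))) (effect_types : Option (List String)) (names : Option (List String)), Dom_has_status_rule character effect_types names → Spec_has_status_rule character effect_types names (has_status_rule character effect_types names)

-- ===== LEMMAS AND PROOFS =====

-- ===== VERDICT (by name: the statement is the Claim_ definition above) =====
-- A's loop returns true iff some status matches on effectType or on name
theorem pvLoopA_eq_any (ets nms : PySem.Set String) (l : List (List (String × String))) :
    pvLoopA ets nms l = l.any (fun st =>
      (pvNormOpt ((PySem.Dict.mk st).get? "effectType") ≠ "" && PySem.Set.contains ets (pvNormOpt ((PySem.Dict.mk st).get? "effectType"))) ||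
      (pvNormOpt ((PySem.Dict.mk st).get? "name") ≠ "" && PySem.Set.contains nms (pvNormOpt ((PySem.Dict.mk st).get? "name")))) := by
  induction l with
  | nil => rfl
  | cons st rest ih =>
    simp only [pvLoopA, List.any_cons, ih]
    split_ifs <;> simp_all

-- one side of B: the intersection-minus-{""} is nonempty iff some status matches
theorem pvSide_eq (key : String) (q : List String) (statuses : List (List (String × String))) :
    (!(PySem.Set.diff (PySem.Set.inter
        (PySem.Set.ofList (statuses.map (fun s => pvNormOpt ((PySem.Dict.mk s).get? key))))
        (PySem.Set.ofList (q.map pvNorm))) [""]).isEmpty)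
    = statuses.any (fun st => (pvNormOpt ((PySem.Dict.mk st).get? key) ≠ "" &&
        PySem.Set.contains (PySem.Set.ofList (q.map pvNorm)) (pvNormOpt ((PySem.Dict.mk st).get? key)))) := by
  rw [Bool.eq_iff_iff]
  simp only [Bool.not_eq_eq_eq_not, Bool.not_true, List.isEmpty_eq_false_iff,
    ne_eq, List.eq_nil_iff_forall_not_mem, not_forall, not_not, PySem.Set.mem_diff, PySem.Set.mem_inter, PySem.Set.mem_ofList,
    List.mem_map, List.any_eq_true, Bool.and_eq_true, PySem.Set.contains_iff,
    decide_eq_true_eq, List.mem_singleton]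
  constructor
  · rintro ⟨x, ⟨⟨st, hst, rfl⟩, hq⟩, hne⟩
    exact ⟨st, hst, hne, hq⟩
  · rintro ⟨st, hst, hne, hq⟩
    exact ⟨pvNormOpt ((PySem.Dict.mk st).get? key), ⟨⟨st, hst, rfl⟩, hq⟩, hne⟩

theorem pvAny_or (l : List (List (String × String))) (f g : List (String × String) → Bool) :
    l.any (fun x => f x || g x) = (l.any f || l.any g) := by
  induction l with
  | nil => rfl
  | cons x rest ih =>
    simp only [List.any_cons, ih]
    cases f x <;> cases g x <;> simp

theorem has_status_rule_spec : Claim_equal_has_status_rule := by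
  intro character effect_types names _
  unfold Spec_has_status_rule has_status_rule has_status_rule_alt
  simp only [pvLoopA_eq_any, pvSide_eq, pvAny_or]
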